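-- pv_equiv track=rewrite | github.com/whitem4rk/2023-algorithm-study | LEVEL 2/block.py | solution
-- ===== SOURCE A (Python) =====
-- from collections import deque
--
-- def solution(m, n, board):
--     answer = 0
--     # 터졌을때 col 기준으로 나머지가 내려가기 떄문에 row, col을 바꿔준다.
--     colrow_board = deque(map(deque, zip(*board)))
--
--     while True:
--         del_point = set()
--         # 4칸씩 체크하면서 터트릴것이 있다면 set에 넣기
--         for i in range(0, n-1):
--             for j in range(0, m-1):
--                 cur = colrow_board[i][j]
--                 if cur != 'X' and cur == colrow_board[i][j+1] and cur == colrow_board[i+1][j] and cur == colrow_board[i+1][j+1]: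
--                     del_point.add((i,j))
--                     del_point.add((i,j+1))
--                     del_point.add((i+1,j))
--                     del_point.add((i+1,j+1))
--         # 위에 위치하는것부터 터트려야하므로 정렬
--         del_point = sorted(del_point,key=lambda x: (x[1],x[0]))
--
--         # 만약 지울것이 없다면
--         if len(del_point) == 0:
--             break
--
--         # 터트린후에 X로 배열 맨 앞에 넣어주기
--         for point in del_point:
--             row, col = point
--             del colrow_board[row][col]
--             answer += 1
--             colrow_board[row].appendleft('X')
--
--     return answer
-- ===== SOURCE B (Python) =====
-- def solution(m, n, board):
--     answer = 0
--     cols = [list(c) for c in zip(*board)]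
--
--     def square(a, b):
--         ch = cols[a][b]
--         return ch != 'X' and ch == cols[a][b + 1] == cols[a + 1][b] == cols[a + 1][b + 1]
--
--     def hit(a, b):
--         # is the cell (column a, row b) part of some matched 2x2 square?
--         return any(square(x, y)
--                    for x in (a - 1, a) if 0 <= x < n - 1
--                    for y in (b - 1, b) if 0 <= y < m - 1)
--
--     while True:
--         removed = [[b for b in range(m) if hit(a, b)] for a in range(n)]
--         k = sum(len(dead) for dead in removed)
--         if k == 0:
--             return answer
--         answer += k
--         new_cols = []
--         for a, col in enumerate(cols):
--             dead = removed[a] if a < n else []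
--             keep = [ch for b, ch in enumerate(col) if b not in dead]
--             new_cols.append(['X'] * len(dead) + keep)
--         cols = new_cols
-- ===== Notes on version B (the rewrite author's own statement) =====
-- stated objective: alternative
-- what changed: Replaces A's anchor-marking (a set of the four points of every matched square, sorted by (col,row) and collapsed by sequential deque del+appendleft) with a per-cell classification: each cell asks 'am I inside some matched 2x2 square?', the dead cells of each column are listed, counted with one sum, and every column is rebuilt in one batch ('X'-padding ++ survivors) with no set, no sort and no in-place mutation.
import Mathlib
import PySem

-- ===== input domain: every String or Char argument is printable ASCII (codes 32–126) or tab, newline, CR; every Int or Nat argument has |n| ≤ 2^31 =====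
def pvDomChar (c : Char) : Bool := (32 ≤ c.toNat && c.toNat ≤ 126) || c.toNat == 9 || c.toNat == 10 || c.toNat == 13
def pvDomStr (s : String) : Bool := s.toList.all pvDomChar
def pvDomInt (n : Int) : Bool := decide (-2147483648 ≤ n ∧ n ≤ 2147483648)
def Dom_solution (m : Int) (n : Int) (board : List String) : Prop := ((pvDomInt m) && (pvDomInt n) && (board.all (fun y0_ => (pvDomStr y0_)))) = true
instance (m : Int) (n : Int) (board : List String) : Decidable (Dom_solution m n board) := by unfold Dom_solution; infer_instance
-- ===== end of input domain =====

-- B replaces A's anchor-marking set + sort + sequential deque del/appendleft by a per-cell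
-- 'is this cell inside some matched 2x2 square' classification and a batch per-column rebuild
-- (alternative decomposition; no set of points, no sort, no in-place surgery).

-- ===== PORT A =====

-- zip(*board): truncating transpose (Python's zip stops at the shortest row); used by both sources
def pvZip (rs : List (List Char)) : List (List Char) :=
  match rs with
  | [] => []
  | r0 :: rest =>
    (List.range (rest.foldl (fun a r => min a r.length) r0.length)).map
      (fun j => (r0 :: rest).map (fun r => r[j]!))

-- colrow_board[i][j] / cols[a][b] (always in range under Pre_: the default is never reached there)
def pvCell (st : List (List Char)) (i j : Int) : Char :=
  PySem.List.pyGetD (PySem.List.pyGetD st i []) j 'X'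

-- the 2x2 match scan of A's while-body: the set of points of all matched squares
def pvScanA (n m : Int) (st : List (List Char)) : PySem.Set (Int × Int) :=
  (PySem.List.pyRange 0 (n-1)).foldl (fun s i =>
    (PySem.List.pyRange 0 (m-1)).foldl (fun s j =>
      let cur := pvCell st i j
      if cur ≠ 'X' ∧ cur = pvCell st i (j+1) ∧ cur = pvCell st (i+1) j ∧ cur = pvCell st (i+1) (j+1) then
        ((((PySem.Set.add s (i, j)).add (i, j+1)).add (i+1, j)).add (i+1, j+1))
      else s) s) (PySem.Set.ofList [])

-- del colrow_board[row][col]; colrow_board[row].appendleft('X')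
-- (the indices come from range(...) so they are ≥ 0: .toNat is exact here)
def pvColStep (col : List Char) (j : Int) : List Char := 'X' :: col.eraseIdx j.toNat

-- A's while True loop, fueled (the fuel is always sufficient: each productive round removes ≥ 1 block)
def pvLoopA (fuel : Nat) (n m : Int) (st : List (List Char)) (ans : Int) : Int :=
  match fuel with
  | 0 => ans
  | fuel' + 1 =>
    let pts := PySem.List.sorted2 (pvScanA n m st) (fun p => p.2) (fun p => p.1)
    if pts.length = 0 then ans
    else
      let r := pts.foldl (fun acc pt => (acc.1.modify pt.1.toNat (fun c => pvColStep c pt.2), acc.2 + 1)) (st, ans)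
      pvLoopA fuel' n m r.1 r.2

def solution (m : Int) (n : Int) (board : List String) : Int :=
  let rows := board.map String.toList
  pvLoopA ((rows.map List.length).sum + 1) n m (pvZip rows) 0

-- ===== PORT B =====

-- B's square(a, b): is the 2x2 square anchored at (column a, row b) matched?
def pvSquare (cols : List (List Char)) (a b : Int) : Bool :=
  let ch := pvCell cols a b
  decide (ch ≠ 'X' ∧ ch = pvCell cols a (b+1) ∧
          pvCell cols a (b+1) = pvCell cols (a+1) b ∧
          pvCell cols (a+1) b = pvCell cols (a+1) (b+1))

-- B's hit(a, b): is the cell (column a, row b) inside some matched square?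
def pvHit (cols : List (List Char)) (m n a b : Int) : Bool :=
  ([a - 1, a].filter (fun x => decide (0 ≤ x ∧ x < n - 1))).any (fun x =>
    ([b - 1, b].filter (fun y => decide (0 ≤ y ∧ y < m - 1))).any (fun y => pvSquare cols x y))

-- B's while loop: classify each cell, count, rebuild every column in one batch
def pvLoopB (fuel : Nat) (m n : Int) (cols : List (List Char)) (ans : Int) : Int :=
  match fuel with
  | 0 => ans
  | fuel' + 1 =>
    let removed := (PySem.List.pyRange 0 n).map (fun a =>
      (PySem.List.pyRange 0 m).filter (fun b => pvHit cols m n a b))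
    let k := (removed.map List.length).sum
    if k = 0 then ans
    else
      let cols' := (PySem.List.enumerate cols).map (fun p =>
        let dead := if p.1 < n then PySem.List.pyGetD removed p.1 [] else []
        let keep := ((PySem.List.enumerate p.2).filter (fun q => !decide (q.1 ∈ dead))).map (·.2)
        List.replicate dead.length 'X' ++ keep)
      pvLoopB fuel' m n cols' (ans + k)

def solution_alt (m : Int) (n : Int) (board : List String) : Int :=
  let rows := board.map String.toList
  pvLoopB ((rows.map List.length).sum + 1) m n (pvZip rows) 0

-- ===== PRECONDITION & SPEC =====
-- Exactly the inputs on which A returns (A raises IndexError when m,n ≥ 2 but the board is smaller than m×n)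
def Pre_solution (m : Int) (n : Int) (board : List String) : Prop :=
  2 ≤ m → 2 ≤ n → (m ≤ (board.length : Int) ∧ ∀ s ∈ board, n ≤ (s.length : Int))
instance (m : Int) (n : Int) (board : List String) : Decidable (Pre_solution m n board) := by
  unfold Pre_solution; infer_instance

def pvWitness_solution : Int × Int × List String := (2, 2, ["aab", "aab", "ccd"])

def Spec_solution (m : Int) (n : Int) (board : List String) (out : Int) : Prop := out = solution_alt m n board
instance (m : Int) (n : Int) (board : List String) (out : Int) : Decidable (Spec_solution m n board out) := by unfold Spec_solution; infer_instance

-- ===== CLAIM (what is proved, stated in full; the proofs are below) =====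
def Claim_equal_solution : Prop := ∀ (m : Int) (n : Int) (board : List String), Dom_solution m n board → Pre_solution m n board → Spec_solution m n board (solution m n board)

-- ===== LEMMAS AND PROOFS =====

-- membership invariant of a set-building foldl
theorem pvFoldlSetInv {β : Type} (P : Int × Int → Prop)
    (f : PySem.Set (Int × Int) → β → PySem.Set (Int × Int)) (l : List β)
    (hf : ∀ s b, b ∈ l → ∀ p ∈ f s b, p ∈ s ∨ P p) :
    ∀ acc, (∀ p ∈ acc, P p) → ∀ p ∈ l.foldl f acc, P p := by
  induction l with
  | nil => intro acc ha p hp; exact ha p hp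
  | cons b l ih =>
    intro acc ha p hp
    refine ih (fun s e he => hf s e (by simp [he])) (f acc b) ?_ p hp
    intro q hq
    rcases hf acc b (by simp) q hq with h | h
    · exact ha q h
    · exact h

-- nodup invariant of a set-building foldl
theorem pvFoldlSetNodup {β : Type}
    (f : PySem.Set (Int × Int) → β → PySem.Set (Int × Int)) (l : List β)
    (hf : ∀ s b, s.Nodup → (f s b).Nodup) :
    ∀ acc, acc.Nodup → (l.foldl f acc).Nodup := by
  induction l with
  | nil => intro acc h; exact h
  | cons b l ih => intro acc h; exact ih (f acc b) (hf acc b h)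

-- membership characterization of a set-building foldl
theorem pvFoldlSetMemIff {β : Type} (Q : β → Int × Int → Prop)
    (f : PySem.Set (Int × Int) → β → PySem.Set (Int × Int)) (l : List β) :
    (∀ s b p, b ∈ l → (p ∈ f s b ↔ p ∈ s ∨ Q b p)) →
    ∀ acc p, (p ∈ l.foldl f acc ↔ p ∈ acc ∨ ∃ b ∈ l, Q b p) := by
  induction l with
  | nil => intro _ acc p; simp
  | cons b l ih =>
    intro hf acc p
    simp only [List.foldl_cons]
    rw [ih (fun s b' p' hb' => hf s b' p' (List.mem_cons_of_mem _ hb'))]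
    rw [hf acc b p (by simp)]
    simp only [List.mem_cons]
    constructor
    · rintro ((h | h) | ⟨b', hb', h⟩)
      · exact Or.inl h
      · exact Or.inr ⟨b, Or.inl rfl, h⟩
      · exact Or.inr ⟨b', Or.inr hb', h⟩
    · rintro (h | ⟨b', (rfl | hb'), h⟩)
      · exact Or.inl (Or.inl h)
      · exact Or.inl (Or.inr h)
      · exact Or.inr ⟨b', hb', h⟩

-- every marked point lies in the scan window (and a mark exists only if 2 ≤ n and 2 ≤ m)
def pvP (n m : Int) (p : Int × Int) : Prop :=
  0 ≤ p.1 ∧ p.1 + 1 ≤ n ∧ 0 ≤ p.2 ∧ p.2 + 1 ≤ m ∧ 2 ≤ n ∧ 2 ≤ m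

theorem pvScanA_mem (n m : Int) (st : List (List Char)) :
    ∀ p ∈ pvScanA n m st, pvP n m p := by
  unfold pvScanA
  refine pvFoldlSetInv (pvP n m) _ _ ?_ _ (by simp [PySem.Set.ofList])
  intro s i hi p hp
  have hi' := PySem.List.mem_pyRange_one.mp hi
  refine pvFoldlSetInv (fun p => p ∈ s ∨ pvP n m p) _ _ ?_ s (fun q hq => Or.inl hq) p hp
  intro s' j hj q hq
  have hj' := PySem.List.mem_pyRange_one.mp hj
  dsimp only at hq
  split at hq
  · simp only [PySem.Set.mem_add] at hq
    rcases hq with (((hq | hq) | hq) | hq) | hq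
    · exact Or.inl hq
    all_goals (right; right; subst hq; unfold pvP; dsimp only; omega)
  · exact Or.inl hq

theorem pvScanA_nodup (n m : Int) (st : List (List Char)) : (pvScanA n m st).Nodup := by
  unfold pvScanA
  refine pvFoldlSetNodup _ _ ?_ _ (by simp [PySem.Set.ofList])
  intro s i hs
  refine pvFoldlSetNodup _ _ ?_ s hs
  intro s' j hs'
  dsimp only
  split
  · exact PySem.Set.nodup_add _ _ (PySem.Set.nodup_add _ _ (PySem.Set.nodup_add _ _ (PySem.Set.nodup_add _ _ hs')))
  · exact hs'

-- ---------- the scan characterized pointwise (bridge to B's hit) ----------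

-- A's anchor condition at (column x, row y)
def pvAnchor (st : List (List Char)) (x y : Int) : Prop :=
  pvCell st x y ≠ 'X' ∧ pvCell st x y = pvCell st x (y+1) ∧
  pvCell st x y = pvCell st (x+1) y ∧ pvCell st x y = pvCell st (x+1) (y+1)

theorem pvScanA_mem_iff (n m : Int) (st : List (List Char)) (p : Int × Int) :
    p ∈ pvScanA n m st ↔
      ∃ x, (0 ≤ x ∧ x < n - 1) ∧ ∃ y, (0 ≤ y ∧ y < m - 1) ∧ pvAnchor st x y ∧
        (p.1 = x ∨ p.1 = x + 1) ∧ (p.2 = y ∨ p.2 = y + 1) := by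
  unfold pvScanA
  rw [pvFoldlSetMemIff
      (fun i p => ∃ y, (0 ≤ y ∧ y < m - 1) ∧ pvAnchor st i y ∧
        (p.1 = i ∨ p.1 = i + 1) ∧ (p.2 = y ∨ p.2 = y + 1)) _ _ ?_]
  · constructor
    · rintro (h | ⟨i, hi, y, hy, ha, h1, h2⟩)
      · simp [PySem.Set.ofList] at h
      · exact ⟨i, by simpa using PySem.List.mem_pyRange_one.mp hi, y, hy, ha, h1, h2⟩
    · rintro ⟨x, hx, y, hy, ha, h1, h2⟩
      exact Or.inr ⟨x, PySem.List.mem_pyRange_one.mpr (by omega), y, hy, ha, h1, h2⟩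
  · intro s i p' _
    rw [pvFoldlSetMemIff
        (fun j p' => pvAnchor st i j ∧ (p'.1 = i ∨ p'.1 = i + 1) ∧ (p'.2 = j ∨ p'.2 = j + 1)) _ _ ?_]
    · constructor
      · rintro (h | ⟨j, hj, h⟩)
        · exact Or.inl h
        · exact Or.inr ⟨j, by simpa using PySem.List.mem_pyRange_one.mp hj, h⟩
      · rintro (h | ⟨j, hj, h⟩)
        · exact Or.inl h
        · exact Or.inr ⟨j, PySem.List.mem_pyRange_one.mpr (by omega), h⟩
    · intro s' j q _
      dsimp only
      split
      · rename_i hc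
        simp only [PySem.Set.mem_add]
        constructor
        · rintro ((((h | h) | h) | h) | h)
          · exact Or.inl h
          all_goals (subst h; exact Or.inr ⟨hc, by omega, by omega⟩)
        · rintro (h | ⟨_, h1, h2⟩)
          · exact Or.inl (Or.inl (Or.inl (Or.inl h)))
          · rcases h1 with h1 | h1 <;> rcases h2 with h2 | h2
            · exact Or.inl (Or.inl (Or.inl (Or.inr (Prod.ext h1 h2))))
            · exact Or.inl (Or.inl (Or.inr (Prod.ext h1 h2)))
            · exact Or.inl (Or.inr (Prod.ext h1 h2))
            · exact Or.inr (Prod.ext h1 h2)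
      · rename_i hc
        constructor
        · exact fun h => Or.inl h
        · rintro (h | ⟨ha, _, _⟩)
          · exact h
          · exact absurd ha hc

theorem pvSquare_iff (st : List (List Char)) (x y : Int) :
    pvSquare st x y = true ↔ pvAnchor st x y := by
  unfold pvSquare pvAnchor
  rw [decide_eq_true_iff]
  constructor
  · rintro ⟨h1, h2, h3, h4⟩
    exact ⟨h1, h2, h2.trans h3, h2.trans (h3.trans h4)⟩
  · rintro ⟨h1, h2, h3, h4⟩
    exact ⟨h1, h2, h2.symm.trans h3, h3.symm.trans h4⟩

theorem pvHit_iff (st : List (List Char)) (m n a b : Int) :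
    pvHit st m n a b = true ↔ ((a, b) : Int × Int) ∈ pvScanA n m st := by
  rw [pvScanA_mem_iff]
  unfold pvHit
  simp only [List.any_eq_true, List.mem_filter, List.mem_cons,
    List.not_mem_nil, or_false, decide_eq_true_eq]
  constructor
  · rintro ⟨x, ⟨hxm, hxb⟩, y, ⟨hym, hyb⟩, hsq⟩
    exact ⟨x, hxb, y, hyb, (pvSquare_iff st x y).mp hsq, by omega, by omega⟩
  · rintro ⟨x, hxb, y, hyb, ha, h1, h2⟩
    exact ⟨x, ⟨by omega, hxb⟩, y, ⟨by omega, hyb⟩, (pvSquare_iff st x y).mpr ha⟩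

-- ---------- counting: B's sum of dead lists = |scan| ----------

theorem pvDead_mem (st : List (List Char)) (m n a : Int) (b : Int) :
    b ∈ (PySem.List.pyRange 0 m).filter (fun b => pvHit st m n a b) ↔
      ((a, b) : Int × Int) ∈ pvScanA n m st := by
  rw [List.mem_filter]
  constructor
  · rintro ⟨_, hh⟩
    exact (pvHit_iff st m n a b).mp hh
  · intro hm'
    have hP := pvScanA_mem n m st _ hm'
    unfold pvP at hP
    exact ⟨PySem.List.mem_pyRange_one.mpr (by dsimp only at hP; omega), (pvHit_iff st m n a b).mpr hm'⟩

theorem pvCount (st : List (List Char)) (m n : Int) :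
    (((PySem.List.pyRange 0 n).map (fun a =>
        (PySem.List.pyRange 0 m).filter (fun b => pvHit st m n a b))).map List.length).sum
      = (pvScanA n m st).length := by
  set L := (PySem.List.pyRange 0 n).flatMap (fun a =>
    ((PySem.List.pyRange 0 m).filter (fun b => pvHit st m n a b)).map
      (fun b => ((a, b) : Int × Int))) with hL
  have hlen : L.length
      = (((PySem.List.pyRange 0 n).map (fun a =>
          (PySem.List.pyRange 0 m).filter (fun b => pvHit st m n a b))).map List.length).sum := by
    rw [hL, List.length_flatMap]
    simp [List.map_map, Function.comp_def]
  have hmemL : ∀ p : Int × Int, p ∈ L ↔ (0 ≤ p.1 ∧ p.1 < n ∧ p ∈ pvScanA n m st) := by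
    intro p
    rw [hL]
    simp only [List.mem_flatMap, List.mem_map]
    constructor
    · rintro ⟨a, ha, b, hb, rfl⟩
      have := (pvDead_mem st m n a b).mp hb
      have ha' := PySem.List.mem_pyRange_one.mp ha
      exact ⟨by dsimp only; omega, by dsimp only; omega, this⟩
    · rintro ⟨h0, h1, hmem⟩
      exact ⟨p.1, PySem.List.mem_pyRange_one.mpr (by omega), p.2,
        (pvDead_mem st m n p.1 p.2).mpr (by simpa using hmem), rfl⟩
  have hndL : L.Nodup := by
    rw [hL, List.nodup_flatMap]
    constructor
    · intro a _
      exact ((PySem.List.nodup_pyRange_one 0 m).filter _).map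
        (fun x y h => by simpa using congrArg Prod.snd h)
    · refine (PySem.List.pairwise_lt_pyRange_one 0 n).imp ?_
      intro a a' hlt p hp hp'
      simp only [List.mem_map, List.mem_filter] at hp hp'
      obtain ⟨b, _, rfl⟩ := hp
      obtain ⟨b', _, h2⟩ := hp'
      have := congrArg Prod.fst h2
      dsimp only at this
      omega
  have hsub1 : L ⊆ pvScanA n m st := fun p hp => ((hmemL p).mp hp).2.2
  have hsub2 : pvScanA n m st ⊆ L := by
    intro p hp
    have hP := pvScanA_mem n m st p hp
    unfold pvP at hP
    exact (hmemL p).mpr ⟨hP.1, by omega, hp⟩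
  have h1 := (hndL.subperm hsub1).length_le
  have h2 := ((pvScanA_nodup n m st).subperm hsub2).length_le
  omega

-- ---------- the sort: Python's lexicographic (j, i) order ----------

-- strict and non-strict lexicographic order on the (j, i) keys
def pvPlt (p q : Int × Int) : Prop := p.2 < q.2 ∨ (p.2 = q.2 ∧ p.1 < q.1)
def pvPle (p q : Int × Int) : Prop := p.2 < q.2 ∨ (p.2 = q.2 ∧ p.1 ≤ q.1)
def pvBf (a b : Int × Int) : Bool := decide (a.2 < b.2) || (!decide (b.2 < a.2) && decide (a.1 < b.1))

theorem pvSorted2_eq (xs : List (Int × Int)) :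
    PySem.List.sorted2 xs (fun p => p.2) (fun p => p.1)
      = xs.foldl (fun acc x => PySem.List.insertBy pvBf x acc) [] := rfl

theorem pvBf_true {a b : Int × Int} (h : pvBf a b = true) : pvPle a b := by
  unfold pvBf at h; unfold pvPle
  simp only [Bool.or_eq_true, Bool.and_eq_true, Bool.not_eq_true', decide_eq_true_eq, decide_eq_false_iff_not] at h
  omega

theorem pvBf_false {a b : Int × Int} (h : pvBf a b = false) : pvPle b a := by
  unfold pvBf at h; unfold pvPle
  simp only [Bool.or_eq_false_iff, Bool.and_eq_false_iff, Bool.not_eq_false', decide_eq_true_eq, decide_eq_false_iff_not] at h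
  omega

theorem pvPle_trans {a b c : Int × Int} (h1 : pvPle a b) (h2 : pvPle b c) : pvPle a c := by
  unfold pvPle at *; omega

theorem pvInsertBy_pairwise (x : Int × Int) (ys : List (Int × Int)) (h : ys.Pairwise pvPle) :
    (PySem.List.insertBy pvBf x ys).Pairwise pvPle := by
  induction ys with
  | nil =>
    rw [show PySem.List.insertBy pvBf x [] = [x] from rfl]
    simp
  | cons y ys ih =>
    rw [show PySem.List.insertBy pvBf x (y :: ys)
          = if pvBf x y = true then x :: y :: ys else y :: PySem.List.insertBy pvBf x ys from rfl]
    rw [List.pairwise_cons] at h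
    split_ifs with hb
    · refine List.Pairwise.cons ?_ (List.Pairwise.cons h.1 h.2)
      intro z hz
      rcases List.mem_cons.mp hz with rfl | hz
      · exact pvBf_true hb
      · exact pvPle_trans (pvBf_true hb) (h.1 z hz)
    · refine List.Pairwise.cons ?_ (ih h.2)
      intro z hz
      rcases (PySem.List.insertBy_mem_iff _ _ _ _).mp hz with rfl | hz
      · exact pvBf_false (by simpa using hb)
      · exact h.1 z hz

theorem pvSorted2_pairwise (xs : List (Int × Int)) :
    (PySem.List.sorted2 xs (fun p => p.2) (fun p => p.1)).Pairwise pvPle := by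
  rw [pvSorted2_eq]
  suffices h : ∀ (l : List (Int × Int)) (acc : List (Int × Int)), acc.Pairwise pvPle →
      (l.foldl (fun acc x => PySem.List.insertBy pvBf x acc) acc).Pairwise pvPle by
    exact h xs [] (by simp)
  intro l
  induction l with
  | nil => intro acc h; exact h
  | cons x l ih => intro acc h; exact ih _ (pvInsertBy_pairwise x acc h)

theorem pvSorted2_pairwise_lt (xs : List (Int × Int)) (hnd : xs.Nodup) :
    (PySem.List.sorted2 xs (fun p => p.2) (fun p => p.1)).Pairwise pvPlt := by
  have hple := pvSorted2_pairwise xs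
  have hnd' : (PySem.List.sorted2 xs (fun p => p.2) (fun p => p.1)).Nodup :=
    (PySem.List.sorted2_perm xs _ _ false).nodup_iff.mpr hnd
  have := hple.and hnd'
  refine this.imp ?_
  rintro ⟨a1, a2⟩ ⟨b1, b2⟩ ⟨hle, hne⟩
  unfold pvPle at hle; unfold pvPlt
  simp only [Ne, Prod.mk.injEq, not_and] at hne
  dsimp only at *
  rcases hle with h | ⟨h2, h1⟩
  · exact Or.inl h
  · right
    refine ⟨h2, lt_of_le_of_ne h1 ?_⟩
    intro he; exact hne he (by omega)

-- ---------- per-column collapse ----------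

theorem pvEraseIdx_replicate_append (k : Nat) (K : List Char) (i : Nat) (h : k ≤ i) :
    (List.replicate k 'X' ++ K).eraseIdx i = List.replicate k 'X' ++ K.eraseIdx (i - k) := by
  induction k generalizing i with
  | zero => simp
  | succ k ih =>
    cases i with
    | zero => omega
    | succ i =>
      have hsub : i + 1 - (k + 1) = i - k := by omega
      simp only [List.replicate_succ, List.cons_append, List.eraseIdx_cons_succ, hsub]
      rw [ih i (by omega)]

-- the survivors of a column (proof-side view of B's comprehension)
def pvKept (col : List Char) (js : List Int) (off : Int) : List Char :=
  ((PySem.List.enumerate col off).filter (fun q => !decide (q.1 ∈ js))).map (·.2)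

theorem pvKept_nil (js : List Int) (off : Int) : pvKept [] js off = [] := by
  simp [pvKept, PySem.List.enumerate]

theorem pvKept_cons (c : Char) (col : List Char) (js : List Int) (off : Int) :
    pvKept (c :: col) js off
      = (if off ∈ js then ([] : List Char) else [c]) ++ pvKept col js (off + 1) := by
  unfold pvKept
  rw [PySem.List.enumerate_cons]
  by_cases h : off ∈ js <;> simp [h]

theorem pvKept_congr (col : List Char) (js js' : List Int) (off : Int)
    (h : ∀ i : Int, off ≤ i → (i ∈ js ↔ i ∈ js')) : pvKept col js off = pvKept col js' off := by
  unfold pvKept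
  congr 1
  refine List.filter_congr ?_
  intro q hq
  obtain ⟨k, hk, rfl⟩ := (PySem.List.mem_enumerate_iff _ _ _).mp hq
  have := h (off + (k : Int)) (by omega)
  simp [this]

theorem pvNodupBddLength (l : List Int) (a b : Int) (hab : a ≤ b) (hnd : l.Nodup) (hb : ∀ u ∈ l, a ≤ u ∧ u < b) :
    (l.length : Int) ≤ b - a := by
  have hm : (l.map (fun u => (u - a).toNat)).Nodup := by
    refine hnd.map_on ?_
    intro x hx y hy he
    have := hb x hx; have := hb y hy; omega
  have hsub : (l.map (fun u => (u - a).toNat)) ⊆ List.range (b - a).toNat := by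
    intro t ht
    simp only [List.mem_map] at ht
    obtain ⟨u, hu, rfl⟩ := ht
    have := hb u hu
    simp only [List.mem_range]
    omega
  have := (hm.subperm hsub).length_le
  simp only [List.length_map, List.length_range] at this
  omega

theorem pvCntSplit (ws : List Int) (off : Int) :
    (ws.filter (fun u => decide (off ≤ u))).length
      = (ws.filter (fun u => decide (off + 1 ≤ u))).length + ws.count off := by
  induction ws with
  | nil => simp
  | cons w ws ih =>
    simp only [List.filter_cons, List.count_cons, decide_eq_true_eq, beq_iff_eq]
    split_ifs with h1 h2 h3 <;> first | omega | (simp only [List.length_cons]; omega)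

theorem pvKept_eraseIdx :
    ∀ (col : List Char) (off : Int) (ws : List Int) (w : Int),
      0 ≤ off → ws.Nodup → (∀ u ∈ ws, u < w) → off ≤ w → w < off + col.length →
      (pvKept col ws off).eraseIdx
          ((w - off).toNat - (ws.filter (fun u => decide (off ≤ u))).length)
        = pvKept col (w :: ws) off := by
  intro col
  induction col with
  | nil =>
    intro off ws w h0 hnd hlt hle hub
    exfalso
    simp only [List.length_nil, Nat.cast_zero, add_zero] at hub
    omega
  | cons c col ih =>
    intro off ws w h0 hnd hlt hle hub
    rw [pvKept_cons, pvKept_cons (js := w :: ws)]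
    have hcnt := pvCntSplit ws off
    by_cases hoff : off ∈ ws
    · have h1 : ws.count off = 1 := by
        have hle1 := List.nodup_iff_count_le_one.mp hnd off
        have hpos := List.count_pos_iff.mpr hoff
        omega
      have hofflt : off < w := hlt off hoff
      rw [if_pos hoff, if_pos (List.mem_cons_of_mem _ hoff)]
      simp only [List.nil_append]
      have hidx : (w - off).toNat - (ws.filter (fun u => decide (off ≤ u))).length
          = (w - (off + 1)).toNat - (ws.filter (fun u => decide (off + 1 ≤ u))).length := by
        have hcnt' : ((ws.filter (fun u => decide (off + 1 ≤ u))).length : Int) ≤ w - (off + 1) := by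
          refine pvNodupBddLength _ (off + 1) w (by omega) (hnd.filter _) ?_
          intro u hu
          have hu' := List.mem_filter.mp hu
          exact ⟨by simpa using hu'.2, hlt u hu'.1⟩
        omega
      rw [hidx]
      exact ih (off + 1) ws w (by omega) hnd hlt (by omega) (by simp only [List.length_cons] at hub; push_cast at hub ⊢; omega)
    · by_cases hw : off = w
      · subst hw
        have hfl : ws.filter (fun u => decide (off ≤ u)) = [] := by
          refine List.filter_eq_nil_iff.mpr ?_
          intro u hu
          have := hlt u hu
          simp only [decide_eq_true_eq]
          omega
        rw [hfl]
        simp only [List.length_nil, Nat.sub_zero, sub_self, Int.toNat_zero]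
        rw [if_neg hoff, if_pos (List.mem_cons_self)]
        simp only [List.singleton_append, List.eraseIdx_cons_zero, List.nil_append]
        refine pvKept_congr col ws (off :: ws) (off + 1) ?_
        intro i hi
        simp only [List.mem_cons]
        constructor
        · exact fun h => Or.inr h
        · rintro (rfl | h)
          · omega
          · exact h
      · have hofflt : off < w := by rcases lt_or_eq_of_le hle with h | h; exact h; exact absurd h hw
        have hcnt0 : ws.count off = 0 := List.count_eq_zero.mpr hoff
        have hbd : ((ws.filter (fun u => decide (off + 1 ≤ u))).length : Int) ≤ w - (off + 1) := by
          refine pvNodupBddLength _ (off + 1) w (by omega) (hnd.filter _) ?_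
          intro u hu
          have hu' := List.mem_filter.mp hu
          exact ⟨by simpa using hu'.2, hlt u hu'.1⟩
        have hidx : (w - off).toNat - (ws.filter (fun u => decide (off ≤ u))).length
            = ((w - (off + 1)).toNat - (ws.filter (fun u => decide (off + 1 ≤ u))).length) + 1 := by
          omega
        rw [if_neg hoff, if_neg (by simp only [List.mem_cons]; exact fun hor => hor.elim hw hoff)]
        simp only [List.singleton_append]
        rw [hidx, List.eraseIdx_cons_succ]
        rw [ih (off + 1) ws w (by omega) hnd hlt (by omega) (by simp only [List.length_cons] at hub; push_cast at hub ⊢; omega)]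

theorem pvKept_length :
    ∀ (col : List Char) (off : Int) (js : List Int), js.Nodup →
      (∀ u ∈ js, u < off + col.length) →
      (pvKept col js off).length + (js.filter (fun u => decide (off ≤ u))).length = col.length := by
  intro col
  induction col with
  | nil =>
    intro off js hnd hub
    have hfl : js.filter (fun u => decide (off ≤ u)) = [] := by
      refine List.filter_eq_nil_iff.mpr ?_
      intro u hu
      have := hub u hu
      simp only [List.length_nil, Nat.cast_zero, add_zero] at this
      simp only [decide_eq_true_eq]
      omega
    simp [pvKept_nil, hfl]
  | cons c col ih =>
    intro off js hnd hub
    rw [pvKept_cons]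
    have hcnt := pvCntSplit js off
    have hih := ih (off + 1) js hnd (by intro u hu; have := hub u hu; simp only [List.length_cons] at this; push_cast at this ⊢; omega)
    by_cases h : off ∈ js
    · have h1 : js.count off = 1 := by
        have hle1 := List.nodup_iff_count_le_one.mp hnd off
        have hpos := List.count_pos_iff.mpr h
        omega
      rw [if_pos h]
      simp only [List.nil_append, List.length_cons]
      omega
    · have h0 : js.count off = 0 := List.count_eq_zero.mpr h
      rw [if_neg h]
      simp only [List.singleton_append, List.length_cons]
      omega

theorem pvFoldlColStep (js : List Int) (col : List Char)
    (hpw : js.Pairwise (· < ·)) (hb : ∀ u ∈ js, 0 ≤ u ∧ u < (col.length : Int)) :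
    js.foldl pvColStep col = List.replicate js.length 'X' ++ pvKept col js 0 := by
  induction js using List.reverseRecOn with
  | nil => simp [pvKept, PySem.List.map_snd_enumerate]
  | append_singleton ws w ih =>
    rw [List.pairwise_append] at hpw
    obtain ⟨hws, -, hwlt⟩ := hpw
    have hwsnd : ws.Nodup := hws.imp (fun h => ne_of_lt h)
    have hwub : ∀ u ∈ ws, u < w := fun u hu => hwlt u hu w (by simp)
    have hb' : ∀ u ∈ ws, 0 ≤ u ∧ u < (col.length : Int) := fun u hu => hb u (by simp [hu])
    have hw := hb w (by simp)
    have hk : (ws.length : Int) ≤ w :=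
      le_trans (pvNodupBddLength ws 0 w (by omega) hwsnd (fun u hu => ⟨(hb' u hu).1, hwub u hu⟩)) (by omega)
    rw [List.foldl_append]
    simp only [List.foldl_cons, List.foldl_nil]
    rw [ih hws hb']
    unfold pvColStep
    rw [pvEraseIdx_replicate_append ws.length _ w.toNat (by omega)]
    have hfl : ws.filter (fun u => decide (0 ≤ u)) = ws :=
      List.filter_eq_self.mpr (by intro u hu; simp only [decide_eq_true_eq]; exact (hb' u hu).1)
    have hE := pvKept_eraseIdx col 0 ws w le_rfl hwsnd hwub (by omega) (by omega)
    rw [hfl] at hE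
    simp only [sub_zero] at hE
    rw [hE]
    rw [pvKept_congr col (w :: ws) (ws ++ [w]) 0 (by intro i _; simp [or_comm])]
    simp [List.replicate_succ]

-- ---------- factorizing A's sequential deque surgery per column ----------

theorem pvFoldlModifyLength (pts : List (Int × Int)) (st : List (List Char)) :
    (pts.foldl (fun s pt => s.modify pt.1.toNat (fun c => pvColStep c pt.2)) st).length
      = st.length := by
  induction pts generalizing st with
  | nil => rfl
  | cons pt pts ih =>
    simp only [List.foldl_cons]
    rw [ih, List.length_modify]

theorem pvFoldlModifyGet (pts : List (Int × Int)) (st : List (List Char)) (k : Nat) (hk : k < st.length) :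
    (pts.foldl (fun s pt => s.modify pt.1.toNat (fun c => pvColStep c pt.2)) st)[k]'(by
        rw [pvFoldlModifyLength]; exact hk)
      = ((pts.filter (fun pt => pt.1.toNat == k)).map (·.2)).foldl pvColStep (st[k]'hk) := by
  induction pts generalizing st with
  | nil => simp
  | cons pt pts ih =>
    simp only [List.foldl_cons, List.filter_cons]
    have hk' : k < (st.modify pt.1.toNat (fun c => pvColStep c pt.2)).length := by
      rw [List.length_modify]; exact hk
    have hmod : (st.modify pt.1.toNat (fun c => pvColStep c pt.2))[k]'hk'
        = if pt.1.toNat = k then pvColStep (st[k]'hk) pt.2 else st[k]'hk := by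
      rw [List.getElem_modify]
    by_cases hpt : pt.1.toNat = k
    · rw [show (pt.1.toNat == k) = true from by simp only [beq_iff_eq]; exact hpt]
      simp only [if_true, List.map_cons, List.foldl_cons]
      rw [ih _ hk']
      rw [hmod, if_pos hpt]
    · rw [show (pt.1.toNat == k) = false from by simp only [beq_eq_false_iff_ne, ne_eq]; exact hpt]
      simp only [Bool.false_eq_true, if_false]
      rw [ih _ hk']
      rw [hmod, if_neg hpt]

-- ---------- one round: A's sorted sequential collapse, batch form ----------

theorem pvRoundState (st : List (List Char)) (marks : List (Int × Int))
    (hnd : marks.Nodup)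
    (hb : ∀ p ∈ marks, 0 ≤ p.1 ∧ 0 ≤ p.2 ∧ ∀ c ∈ st, p.2 < (c.length : Int)) :
    (PySem.List.sorted2 marks (fun p => p.2) (fun p => p.1)).foldl
        (fun s pt => s.modify pt.1.toNat (fun c => pvColStep c pt.2)) st
      = (PySem.List.enumerate st).map (fun p =>
          let kept := ((PySem.List.enumerate p.2).filter
              (fun q => !(PySem.Set.contains marks (p.1, q.1)))).map (·.2)
          List.replicate (p.2.length - kept.length) 'X' ++ kept) := by
  have hperm : (PySem.List.sorted2 marks (fun p => p.2) (fun p => p.1)).Perm marks :=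
    PySem.List.sorted2_perm marks _ _ false
  set pts := PySem.List.sorted2 marks (fun p => p.2) (fun p => p.1) with hpts
  have hptsnd : pts.Nodup := hperm.nodup_iff.mpr hnd
  have hplt : pts.Pairwise pvPlt := pvSorted2_pairwise_lt marks hnd
  have hbp : ∀ p ∈ pts, 0 ≤ p.1 ∧ 0 ≤ p.2 ∧ ∀ c ∈ st, p.2 < (c.length : Int) :=
    fun p hp => hb p (hperm.subset hp)
  refine List.ext_getElem ?_ ?_
  · rw [pvFoldlModifyLength]
    simp [PySem.List.length_enumerate]
  · intro k h1 h2
    have hk : k < st.length := by rw [pvFoldlModifyLength] at h1; exact h1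
    rw [pvFoldlModifyGet pts st k hk]
    set js := ((pts.filter (fun pt => pt.1.toNat == k)).map (·.2)) with hjs
    have hjsmem : ∀ u : Int, u ∈ js ↔ ((k : Int), u) ∈ pts := by
      intro u
      constructor
      · intro hu
        rw [hjs] at hu
        simp only [List.mem_map, List.mem_filter] at hu
        obtain ⟨pt, ⟨hp, hbeq⟩, hu2⟩ := hu
        have h0 := (hbp pt hp).1
        have : pt = ((k : Int), u) := by
          have := beq_iff_eq.mp hbeq
          cases pt
          simp only [Prod.mk.injEq]
          constructor
          · dsimp only at h0 this ⊢; omega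
          · exact hu2
        rwa [this] at hp
      · intro hu
        rw [hjs]
        simp only [List.mem_map, List.mem_filter]
        exact ⟨((k : Int), u), ⟨hu, by simp⟩, rfl⟩
    have hjb : ∀ u ∈ js, 0 ≤ u ∧ u < ((st[k]'hk).length : Int) := by
      intro u hu
      have hp := hbp _ ((hjsmem u).mp hu)
      exact ⟨hp.2.1, hp.2.2 _ (List.getElem_mem hk)⟩
    have hjpw : js.Pairwise (· < ·) := by
      rw [hjs, List.pairwise_map]
      refine List.Pairwise.imp_of_mem ?_ (hplt.filter _)
      intro a b ha hb' hab
      have hka : a.1.toNat = k := by simpa using (List.mem_filter.mp ha).2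
      have hkb : b.1.toNat = k := by simpa using (List.mem_filter.mp hb').2
      have h0a := (hbp a (List.mem_filter.mp ha).1).1
      have h0b := (hbp b (List.mem_filter.mp hb').1).1
      unfold pvPlt at hab
      omega
    have hjnd : js.Nodup := by
      rw [hjs]
      refine (hptsnd.filter _).map_on ?_
      intro x hx y hy he
      have hkx : x.1.toNat = k := by simpa using (List.mem_filter.mp hx).2
      have hky : y.1.toNat = k := by simpa using (List.mem_filter.mp hy).2
      have h0x := (hbp x (List.mem_filter.mp hx).1).1
      have h0y := (hbp y (List.mem_filter.mp hy).1).1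
      cases x; cases y
      simp only [Prod.mk.injEq]
      dsimp only at *
      exact ⟨by omega, he⟩
    rw [pvFoldlColStep js (st[k]'hk) hjpw hjb]
    rw [List.getElem_map, PySem.List.getElem_enumerate]
    dsimp only
    have hcong : ((PySem.List.enumerate (st[k]'(by simpa [PySem.List.length_enumerate] using h2))).filter
          (fun q => !(PySem.Set.contains marks (((0 : Int) + (k : Nat)), q.1)))).map (·.2)
        = pvKept (st[k]'hk) js 0 := by
      unfold pvKept
      congr 1
      refine List.filter_congr ?_
      intro q hq
      have hiff : ((k : Int), q.1) ∈ marks ↔ q.1 ∈ js := by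
        rw [hjsmem, hperm.mem_iff]
      congr 1
      by_cases hc : ((k : Int), q.1) ∈ marks
      · rw [(PySem.Set.contains_iff marks _).mpr (by simpa using hc)]
        simp [hiff.mp hc]
      · have : PySem.Set.contains marks (((0 : Int) + (k : Nat)), q.1) = false := by
          rw [← Bool.not_eq_true]
          intro hcc
          exact hc (by simpa using (PySem.Set.contains_iff marks _).mp hcc)
        rw [this]
        symm
        simp only [decide_eq_false_iff_not]
        intro hj
        exact hc (hiff.mpr hj)
    rw [hcong]
    have hfl : js.filter (fun u => decide (0 ≤ u)) = js :=
      List.filter_eq_self.mpr (by intro u hu; simp only [decide_eq_true_eq]; exact (hjb u hu).1)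
    have hlen := pvKept_length (st[k]'hk) 0 js hjnd
      (by intro u hu; have := (hjb u hu).2; push_cast at this ⊢; omega)
    rw [hfl] at hlen
    rw [show (st[k]'hk).length - (pvKept (st[k]'hk) js 0).length = js.length from by omega]

-- ---------- bridging the batch form to B's dead-list rebuild ----------

theorem pvRoundStateB (st : List (List Char)) (n m : Int)
    (hdim : ∀ c ∈ st, m ≤ (c.length : Int)) :
    (PySem.List.enumerate st).map (fun p =>
        let kept := ((PySem.List.enumerate p.2).filter
            (fun q => !(PySem.Set.contains (pvScanA n m st) (p.1, q.1)))).map (·.2)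
        List.replicate (p.2.length - kept.length) 'X' ++ kept)
      = (PySem.List.enumerate st).map (fun p =>
        let dead := if p.1 < n then
            PySem.List.pyGetD ((PySem.List.pyRange 0 n).map (fun a =>
              (PySem.List.pyRange 0 m).filter (fun b => pvHit st m n a b))) p.1 []
          else []
        let keep := ((PySem.List.enumerate p.2).filter (fun q => !decide (q.1 ∈ dead))).map (·.2)
        List.replicate dead.length 'X' ++ keep) := by
  refine List.map_congr_left ?_
  intro p hp
  obtain ⟨k, hk, rfl⟩ := (PySem.List.mem_enumerate_iff _ _ _).mp hp
  dsimp only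
  simp only [zero_add]
  by_cases hkn : ((k : Int)) < n
  · rw [if_pos hkn]
    rw [PySem.List.pyGetD_map_pyRange_of_nonneg _ _ _ _ (by omega) hkn]
    set dead := (PySem.List.pyRange 0 m).filter (fun b => pvHit st m n (k : Int) b) with hdead
    have hdm : ∀ u : Int, u ∈ dead ↔ ((k : Int), u) ∈ pvScanA n m st := fun u => pvDead_mem st m n _ u
    have hcong : ((PySem.List.enumerate st[k]).filter
          (fun q => !(PySem.Set.contains (pvScanA n m st) ((k : Int), q.1)))).map (·.2)
        = ((PySem.List.enumerate st[k]).filter (fun q => !decide (q.1 ∈ dead))).map (·.2) := by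
      congr 1
      refine List.filter_congr ?_
      intro q _
      congr 1
      by_cases hc : ((k : Int), q.1) ∈ pvScanA n m st
      · rw [(PySem.Set.contains_iff _ _).mpr hc]
        simp [(hdm q.1).mpr hc]
      · have h1 : PySem.Set.contains (pvScanA n m st) ((k : Int), q.1) = false := by
          rw [← Bool.not_eq_true]
          exact fun hcc => hc ((PySem.Set.contains_iff _ _).mp hcc)
        rw [h1]
        symm
        simp only [decide_eq_false_iff_not]
        exact fun hj => hc ((hdm q.1).mp hj)
    rw [hcong]
    have hdnd : dead.Nodup := (PySem.List.nodup_pyRange_one 0 m).filter _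
    have hdub : ∀ u ∈ dead, u < 0 + (st[k].length : Int) := by
      intro u hu
      have hP := pvScanA_mem n m st _ ((hdm u).mp hu)
      unfold pvP at hP
      have := hdim st[k] (List.getElem_mem hk)
      dsimp only at hP
      omega
    have hlen := pvKept_length st[k] 0 dead hdnd (by intro u hu; have := hdub u hu; push_cast at this ⊢; omega)
    have hfl : dead.filter (fun u => decide (0 ≤ u)) = dead := by
      refine List.filter_eq_self.mpr ?_
      intro u hu
      have hP := pvScanA_mem n m st _ ((hdm u).mp hu)
      unfold pvP at hP
      simp only [decide_eq_true_eq]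
      omega
    rw [hfl] at hlen
    have hkeq : ((PySem.List.enumerate st[k]).filter (fun q => !decide (q.1 ∈ dead))).map (·.2)
        = pvKept st[k] dead 0 := rfl
    rw [hkeq]
    rw [show st[k].length - (pvKept st[k] dead 0).length = dead.length from by omega]
  · rw [if_neg hkn]
    have hnone : ∀ q : Int × Char, PySem.Set.contains (pvScanA n m st) ((k : Int), q.1) = false := by
      intro q
      rw [← Bool.not_eq_true]
      intro hcc
      have hP := pvScanA_mem n m st _ ((PySem.Set.contains_iff _ _).mp hcc)
      unfold pvP at hP
      dsimp only at hP
      omega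
    simp only [hnone, Bool.not_false, List.filter_true, List.not_mem_nil, decide_false,
      List.length_nil, List.replicate_zero, List.nil_append, PySem.List.map_snd_enumerate]
    simp

-- ---------- the fueled while loops agree ----------

theorem pvFoldlPair (pts : List (Int × Int)) (st : List (List Char)) (ans : Int) :
    pts.foldl (fun acc pt => (acc.1.modify pt.1.toNat (fun c => pvColStep c pt.2), acc.2 + 1)) (st, ans)
      = (pts.foldl (fun s pt => s.modify pt.1.toNat (fun c => pvColStep c pt.2)) st,
         ans + pts.length) := by
  induction pts generalizing st ans with
  | nil => simp
  | cons pt pts ih =>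
    simp only [List.foldl_cons, List.length_cons]
    rw [ih]
    congr 1
    omega

theorem pvLoop_eq (fuel : Nat) (n m : Int) :
    ∀ (st : List (List Char)) (ans : Int),
      (2 ≤ n → 2 ≤ m → ∀ c ∈ st, m ≤ (c.length : Int)) →
      pvLoopA fuel n m st ans = pvLoopB fuel m n st ans := by
  induction fuel with
  | zero => intro st ans _; rfl
  | succ fuel ih =>
    intro st ans hdim
    rw [pvLoopA, pvLoopB]
    simp only []
    have hcnt := pvCount st m n
    by_cases hm : pvScanA n m st = []
    · have hk0 : (((PySem.List.pyRange 0 n).map (fun a =>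
          (PySem.List.pyRange 0 m).filter (fun b => pvHit st m n a b))).map List.length).sum = 0 := by
        rw [hcnt, hm]; rfl
      rw [hk0, hm]
      rfl
    · have hmem := pvScanA_mem n m st
      obtain ⟨p0, hp0⟩ := List.exists_mem_of_ne_nil _ hm
      have hnm : 2 ≤ n ∧ 2 ≤ m := by
        have := hmem p0 hp0
        unfold pvP at this
        exact ⟨this.2.2.2.2.1, this.2.2.2.2.2⟩
      have hperm : (PySem.List.sorted2 (pvScanA n m st) (fun p => p.2) (fun p => p.1)).Perm
          (pvScanA n m st) := PySem.List.sorted2_perm _ _ _ false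
      have hlen : (PySem.List.sorted2 (pvScanA n m st) (fun p => p.2) (fun p => p.1)).length
          = (pvScanA n m st).length := hperm.length_eq
      have hne : ¬ ((PySem.List.sorted2 (pvScanA n m st) (fun p => p.2) (fun p => p.1)).length = 0) := by
        rw [hlen]
        simp [List.length_eq_zero_iff, hm]
      have hkne : ¬ ((((PySem.List.pyRange 0 n).map (fun a =>
          (PySem.List.pyRange 0 m).filter (fun b => pvHit st m n a b))).map List.length).sum = 0) := by
        rw [hcnt]
        simp [List.length_eq_zero_iff, hm]
      rw [if_neg hne, if_neg hkne]
      rw [pvFoldlPair]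
      have hb : ∀ p ∈ pvScanA n m st, 0 ≤ p.1 ∧ 0 ≤ p.2 ∧ ∀ c ∈ st, p.2 < (c.length : Int) := by
        intro p hp
        have hP := hmem p hp
        unfold pvP at hP
        refine ⟨hP.1, hP.2.2.1, ?_⟩
        intro c hc
        have := hdim hnm.1 hnm.2 c hc
        omega
      simp only []
      rw [pvRoundState st (pvScanA n m st) (pvScanA_nodup n m st) hb, hlen, hcnt]
      rw [pvRoundStateB st n m (hdim hnm.1 hnm.2)]
      refine ih _ _ ?_
      intro _ _ c' hc'
      simp only [List.mem_map] at hc'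
      obtain ⟨p, hp, rfl⟩ := hc'
      obtain ⟨k, hklt, rfl⟩ := (PySem.List.mem_enumerate_iff _ _ _).mp hp
      dsimp only
      simp only [zero_add]
      have hcst := hdim hnm.1 hnm.2 (st[k]) (List.getElem_mem hklt)
      by_cases hkn : ((k : Int)) < n
      · rw [if_pos hkn]
        rw [PySem.List.pyGetD_map_pyRange_of_nonneg _ _ _ _ (by omega) hkn]
        set dead := (PySem.List.pyRange 0 m).filter (fun b => pvHit st m n (k : Int) b) with hdead
        have hdnd : dead.Nodup := (PySem.List.nodup_pyRange_one 0 m).filter _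
        have hdub : ∀ u ∈ dead, u < 0 + (st[k].length : Int) := by
          intro u hu
          have hP := pvScanA_mem n m st _ ((pvDead_mem st m n _ u).mp hu)
          unfold pvP at hP
          dsimp only at hP
          omega
        have hlen2 := pvKept_length st[k] 0 dead hdnd
          (by intro u hu; have := hdub u hu; push_cast at this ⊢; omega)
        have hfl : dead.filter (fun u => decide (0 ≤ u)) = dead := by
          refine List.filter_eq_self.mpr ?_
          intro u hu
          have hP := pvScanA_mem n m st _ ((pvDead_mem st m n _ u).mp hu)
          unfold pvP at hP
          simp only [decide_eq_true_eq]
          omega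
        rw [hfl] at hlen2
        have hkeq : ((PySem.List.enumerate st[k]).filter (fun q => !decide (q.1 ∈ dead))).map (·.2)
            = pvKept st[k] dead 0 := rfl
        rw [List.length_append, List.length_replicate, hkeq]
        push_cast
        omega
      · rw [if_neg hkn]
        simp only [List.not_mem_nil, decide_false, Bool.not_false, List.filter_true,
          List.length_nil, List.replicate_zero, List.nil_append, PySem.List.map_snd_enumerate]
        simpa [PySem.List.map_snd_enumerate] using hcst

-- initial dimensions of the transposed board
theorem pvZip_col_len (rs : List (List Char)) :
    ∀ c ∈ pvZip rs, c.length = rs.length := by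
  intro c hc
  unfold pvZip at hc
  match rs, hc with
  | r0 :: rest, hc =>
    simp only [List.mem_map] at hc
    obtain ⟨j, _, rfl⟩ := hc
    simp

-- ===== VERDICT (by name: the statement is the Claim_ definition above) =====
theorem solution_spec : Claim_equal_solution := by
  intro m n board _ hpre
  unfold Spec_solution solution solution_alt
  refine pvLoop_eq _ n m _ 0 ?_
  intro hn hm c hc
  have hc' := pvZip_col_len (board.map String.toList) c hc
  rw [hc', List.length_map]
  have hb := hpre hm hn
  omega
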